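-- pv_equiv track=rewrite | github.com/polaris64/advent-of-code | 2021/03/solve.py | calculate
-- ===== SOURCE A (Python) =====
-- def calculate(inp):
--     word_len = len(inp[0])
--     output = ["0"] * word_len
--     for bit in range(word_len):
--         count = [0, 0]
--         for word in inp:
--             if word[bit] == "0":
--                 count[0] += 1
--             elif word[bit] == "1":
--                 count[1] += 1
--         output[bit] = "0" if count[0] > count[1] else "1"
--     return (
--         output,
--         ["1" if x == "0" else "0" for x in output],
--     )
-- ===== SOURCE B (Python) =====
-- def calculate(inp):
--     word_len = len(inp[0])
--     counts = [(0, 0)] * word_len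
--     for word in inp:
--         counts = [
--             (c0 + (word[col] == "0"), c1 + (word[col] == "1"))
--             for col, (c0, c1) in enumerate(counts)
--         ]
--     gamma = ["0" if c0 > c1 else "1" for c0, c1 in counts]
--     epsilon = ["1" if c0 > c1 else "0" for c0, c1 in counts]
--     return (gamma, epsilon)
-- ===== Notes on version B (the rewrite author's own statement) =====
-- stated objective: alternative
-- what changed: replaces A's column-major nested scan (re-reading all words once per bit position) with a single row-major pass that folds each word into a per-column tally table via zip, then derives gamma and epsilon each directly from the table
import Mathlib
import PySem

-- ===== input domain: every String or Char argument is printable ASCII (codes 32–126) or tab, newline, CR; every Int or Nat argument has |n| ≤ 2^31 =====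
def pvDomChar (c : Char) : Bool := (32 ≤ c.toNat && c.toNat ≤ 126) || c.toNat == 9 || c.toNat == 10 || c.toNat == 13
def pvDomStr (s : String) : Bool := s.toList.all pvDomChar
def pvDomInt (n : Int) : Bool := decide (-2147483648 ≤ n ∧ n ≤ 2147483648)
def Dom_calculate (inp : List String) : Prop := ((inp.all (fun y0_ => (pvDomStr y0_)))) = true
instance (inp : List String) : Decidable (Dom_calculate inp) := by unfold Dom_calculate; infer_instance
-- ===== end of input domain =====

-- B replaces A's column-major nested scan with one row-major zip-fold building a per-column tally table; same cost, different traversal (objective: alternative).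


-- ===== PORT A =====
-- inner 'for word in inp' loop of A, counting '0's and '1's at position `bit`
def pvCountBit (inp : List String) (bit : Int) : Int × Int :=
  inp.foldl (fun count word =>
    if PySem.Str.pyGet? word bit = some '0' then (count.1 + 1, count.2)
    else if PySem.Str.pyGet? word bit = some '1' then (count.1, count.2 + 1)
    else count) (0, 0)

def calculate (inp : List String) : List String × List String :=
  let wordLen : Int := PySem.Str.len (PySem.List.pyGetD inp 0 "")
  let output := (PySem.List.pyRange 0 wordLen 1).foldl
    (fun out bit =>
      out.set bit.toNat (if (pvCountBit inp bit).1 > (pvCountBit inp bit).2 then "0" else "1"))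
    (List.replicate wordLen.toNat "0")
  (output, output.map (fun x => if x = "0" then "1" else "0"))

-- ===== PORT B =====
-- one word folded into the per-column tally table (the enumerate comprehension of Source B)
def pvStep (counts : List (Int × Int)) (word : String) : List (Int × Int) :=
  (PySem.List.enumerate counts 0).map (fun ic =>
    (ic.2.1 + (if PySem.Str.pyGet? word ic.1 = some '0' then 1 else 0),
     ic.2.2 + (if PySem.Str.pyGet? word ic.1 = some '1' then 1 else 0)))

def calculate_alt (inp : List String) : List String × List String :=
  let wordLen : Int := PySem.Str.len (PySem.List.pyGetD inp 0 "")
  let counts := inp.foldl pvStep (List.replicate wordLen.toNat ((0 : Int), (0 : Int)))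
  let gamma := counts.map (fun p => if p.1 > p.2 then "0" else "1")
  let epsilon := counts.map (fun p => if p.1 > p.2 then "1" else "0")
  (gamma, epsilon)

-- ===== PRECONDITION & SPEC =====
-- Pre_ excludes exactly the inputs on which Python A raises: the empty list (inp[0] is an
-- IndexError) and lists where some word is shorter than the first (word[bit] is an IndexError).
def Pre_calculate (inp : List String) : Prop :=
  inp ≠ [] ∧ ∀ w ∈ inp, (inp.headD "").toList.length ≤ w.toList.length
instance (inp : List String) : Decidable (Pre_calculate inp) := by unfold Pre_calculate; infer_instance

def pvWitness_calculate : List String := ["010", "011", "110"]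

def Spec_calculate (inp : List String) (out : List String × List String) : Prop := out = calculate_alt inp
instance (inp : List String) (out : List String × List String) : Decidable (Spec_calculate inp out) := by unfold Spec_calculate; infer_instance

-- ===== CLAIM (what is proved, stated in full; the proofs are below) =====
def Claim_equal_calculate : Prop := ∀ (inp : List String), Dom_calculate inp → Pre_calculate inp → Spec_calculate inp (calculate inp)

-- ===== LEMMAS AND PROOFS =====

-- per-column tallies, the common characterisation both ports are reduced to
def pvCol : List String → Nat → Int × Int
  | [], _ => (0, 0)
  | w :: ws, j =>
    let r := pvCol ws j
    (r.1 + (if w.toList[j]? = some '0' then 1 else 0),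
     r.2 + (if w.toList[j]? = some '1' then 1 else 0))

lemma pvCountBit_from (inp : List String) (j : Nat) (h : ∀ w ∈ inp, j < w.toList.length) :
    ∀ cnt : Int × Int,
      inp.foldl (fun count word =>
        if PySem.Str.pyGet? word (j : Int) = some '0' then (count.1 + 1, count.2)
        else if PySem.Str.pyGet? word (j : Int) = some '1' then (count.1, count.2 + 1)
        else count) cnt = (cnt.1 + (pvCol inp j).1, cnt.2 + (pvCol inp j).2) := by
  induction inp with
  | nil => intro cnt; simp [pvCol]
  | cons w ws ih =>
    intro cnt
    have hws : ∀ x ∈ ws, j < x.toList.length := fun x hx => h x (List.mem_cons_of_mem _ hx)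
    have hj : j < w.toList.length := h w List.mem_cons_self
    have hc : w.toList[j]? = some w.toList[j] := List.getElem?_eq_getElem hj
    simp only [List.foldl_cons]
    rw [ih hws]
    simp only [pvCol, PySem.Str.pyGet?_natCast, hc, Option.some.injEq]
    split_ifs <;> simp_all <;> ring

lemma pvCountBit_eq (inp : List String) (j : Nat) (h : ∀ w ∈ inp, j < w.toList.length) :
    pvCountBit inp (j : Int) = pvCol inp j := by
  have := pvCountBit_from inp j h (0, 0)
  simpa [pvCountBit] using this

lemma pvStep_length (counts : List (Int × Int)) (w : String) :
    (pvStep counts w).length = counts.length := by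
  simp [pvStep]

lemma pvFold_counts (inp : List String) (init : List (Int × Int))
    (h : ∀ w ∈ inp, init.length ≤ w.toList.length) :
    (inp.foldl pvStep init).length = init.length ∧
    ∀ j : Nat, (hj : j < init.length) →
      (inp.foldl pvStep init)[j]? =
        some ((init[j].1 + (pvCol inp j).1, init[j].2 + (pvCol inp j).2)) := by
  induction inp generalizing init with
  | nil =>
    refine ⟨rfl, fun j hj => ?_⟩
    simp [pvCol, List.getElem?_eq_getElem hj]
  | cons w ws ih =>
    have hw : init.length ≤ w.toList.length := h w List.mem_cons_self
    have hlen : (pvStep init w).length = init.length := pvStep_length _ _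
    have hws : ∀ x ∈ ws, (pvStep init w).length ≤ x.toList.length := by
      intro x hx; rw [hlen]; exact h x (List.mem_cons_of_mem _ hx)
    obtain ⟨ihl, ihg⟩ := ih (pvStep init w) hws
    constructor
    · simpa [hlen] using ihl
    · intro j hj
      have hj' : j < (pvStep init w).length := by omega
      have hjw : j < w.toList.length := by omega
      have hc : w.toList[j]? = some w.toList[j] := List.getElem?_eq_getElem hjw
      simp only [List.foldl_cons]
      rw [ihg j hj']
      have hstep : (pvStep init w)[j] =
          (init[j].1 + (if w.toList[j] = '0' then 1 else 0),
           init[j].2 + (if w.toList[j] = '1' then 1 else 0)) := by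
        simp [pvStep, PySem.List.getElem_enumerate, hc]
      rw [hstep]
      simp only [pvCol, hc, Option.some.injEq]
      split_ifs <;> simp_all <;> ring

lemma calculate_sets (f : Int → String) :
    ∀ (m : Nat) (L : List String),
      ((PySem.List.pyRange 0 (m : Int) 1).foldl
        (fun out bit => out.set bit.toNat (f bit)) L).length = L.length ∧
      ∀ j : Nat,
        ((PySem.List.pyRange 0 (m : Int) 1).foldl
          (fun out bit => out.set bit.toNat (f bit)) L)[j]? =
          if j < m ∧ j < L.length then some (f j) else L[j]? := by
  intro m
  induction m with
  | zero =>
    intro L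
    rw [show ((0 : Nat) : Int) = 0 from rfl, PySem.List.pyRange_one_eq_nil le_rfl]
    simp
  | succ m ihm =>
    intro L
    obtain ⟨ihl, ihg⟩ := ihm L
    rw [show ((m + 1 : Nat) : Int) = (m : Int) + 1 by push_cast; ring,
        PySem.List.pyRange_one_succ_right (by positivity), List.foldl_append]
    simp only [List.foldl_cons, List.foldl_nil, Int.toNat_natCast]
    constructor
    · rw [List.length_set, ihl]
    · intro j
      rw [List.getElem?_set]
      by_cases hjm : m = j
      · subst hjm
        rw [ihl]
        by_cases hL : m < L.length
        · simp [hL]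
        · simp [hL]
      · rw [if_neg hjm, ihg j]
        have : (j < m ∧ j < L.length) ↔ (j < m + 1 ∧ j < L.length) := by omega
        simp only [this]

-- ===== VERDICT (by name: the statement is the Claim_ definition above) =====
theorem calculate_spec : Claim_equal_calculate := by
  intro inp _hdom hpre
  obtain ⟨hne, hlen⟩ := hpre
  obtain ⟨w0, rest, rfl⟩ : ∃ w0 rest, inp = w0 :: rest := by
    cases inp with
    | nil => exact absurd rfl hne
    | cons a l => exact ⟨a, l, rfl⟩
  have hall : ∀ w ∈ w0 :: rest, w0.toList.length ≤ w.toList.length := by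
    simpa using hlen
  have hWL : PySem.Str.len (PySem.List.pyGetD (w0 :: rest) 0 "") = (w0.toList.length : Int) := by
    simp [PySem.Str.len_eq]
  set n := w0.toList.length with hn
  obtain ⟨hOl, hOg⟩ := calculate_sets
    (fun bit => if (pvCountBit (w0 :: rest) bit).1 > (pvCountBit (w0 :: rest) bit).2 then "0" else "1")
    n (List.replicate n "0")
  obtain ⟨hCl, hCg⟩ := pvFold_counts (w0 :: rest) (List.replicate n ((0 : Int), (0 : Int)))
    (by simpa using hall)
  have hout : (PySem.List.pyRange 0 (n : Int) 1).foldl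
      (fun out bit =>
        out.set bit.toNat (if (pvCountBit (w0 :: rest) bit).1 > (pvCountBit (w0 :: rest) bit).2 then "0" else "1"))
      (List.replicate n "0") =
      ((w0 :: rest).foldl pvStep (List.replicate n ((0 : Int), (0 : Int)))).map
        (fun p => if p.1 > p.2 then "0" else "1") := by
    apply List.ext_getElem?
    intro j
    rw [hOg j, List.getElem?_map]
    by_cases hj : j < n
    · have hjr : j < (List.replicate n ((0 : Int), (0 : Int))).length := by simpa using hj
      rw [hCg j hjr]
      have hcb : pvCountBit (w0 :: rest) (j : Int) = pvCol (w0 :: rest) j :=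
        pvCountBit_eq _ _ (fun w hw => lt_of_lt_of_le hj (hall w hw))
      simp [hj, hcb]
    · have hfold : ((w0 :: rest).foldl pvStep (List.replicate n ((0 : Int), (0 : Int))))[j]? = none :=
        List.getElem?_eq_none (by rw [hCl]; simpa using le_of_not_gt hj)
      rw [hfold]
      simp [hj]
  show _ = calculate_alt _
  simp only [calculate, calculate_alt, hWL, Int.toNat_natCast]
  rw [hout, List.map_map]
  refine Prod.ext rfl ?_
  show List.map _ _ = _
  congr 1
  funext p
  by_cases hp : p.1 > p.2 <;> simp [hp]
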